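-- pv_equiv track=rewrite | github.com/huge3286/job | old/test.py | distMoney
-- ===== SOURCE A (Python) =====
-- def distMoney(money: int, children: int) -> int:
--     def check(c):
--         m = money - c * 8  # 剩下的钱
--         if m < children - c:
--             return False
--         if children - c == 1 and m == 4:
--             return False
--         return True
--
--     l, r = 0, children
--     ans = 0
--     while l <= r:
--         m = (l + r) // 2
--         if check(m):
--             ans = m
--             l = m + 1
--         else:
--             r = m - 1
--
--     return ans
-- ===== SOURCE B (Python) =====
-- def distMoney(money: int, children: int) -> int:
--     cap = (money - children) // 7
--     c = min(children, cap)
--     if c == children - 1 and money == 8 * children - 4: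
--         c -= 1
--     return max(c, 0)
-- ===== Notes on version B (the rewrite author's own statement) =====
-- stated objective: simpler
-- what changed: Replaced the binary search with helper predicate by a direct closed-form computation: cap = (money - children) // 7, c = min(children, cap), one special-case decrement when money == 8*children - 4, and max(c, 0).
import Mathlib
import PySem

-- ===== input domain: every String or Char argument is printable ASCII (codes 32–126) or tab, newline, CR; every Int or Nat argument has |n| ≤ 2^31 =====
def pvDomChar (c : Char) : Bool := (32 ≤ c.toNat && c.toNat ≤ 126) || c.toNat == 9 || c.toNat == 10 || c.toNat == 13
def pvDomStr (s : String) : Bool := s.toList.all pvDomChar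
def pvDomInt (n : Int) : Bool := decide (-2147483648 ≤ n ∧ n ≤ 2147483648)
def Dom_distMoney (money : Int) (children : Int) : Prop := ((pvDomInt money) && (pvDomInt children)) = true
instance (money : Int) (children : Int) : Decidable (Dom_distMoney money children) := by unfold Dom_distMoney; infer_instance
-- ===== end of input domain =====

-- B replaces A's binary search by a closed-form computation (simpler); same return value everywhere.
-- ===== PORT A =====
-- inner helper check(c) of A
def checkA (money : Int) (children : Int) (c : Int) : Bool :=
  let m := money - c * 8
  if m < children - c then false
  else if children - c == 1 && m == 4 then false
  else true

-- the while loop of A, recursing on the shrinking interval [l, r]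
def loopA (money : Int) (children : Int) (l : Int) (r : Int) (ans : Int) : Int :=
  if h : l ≤ r then
    let m := PySem.Int.floordiv (l + r) 2
    if checkA money children m then loopA money children (m + 1) r m
    else loopA money children l (m - 1) ans
  else ans
termination_by (r + 1 - l).toNat
decreasing_by
  · have hb := PySem.Int.floordiv_two_mid_bounds h
    omega
  · have hb := PySem.Int.floordiv_two_mid_bounds h
    omega

def distMoney (money : Int) (children : Int) : Int :=
  loopA money children 0 children 0

-- ===== PORT B =====
def distMoney_alt (money : Int) (children : Int) : Int :=
  let cap := PySem.Int.floordiv (money - children) 7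
  let c := min children cap
  let c := if c == children - 1 && money == 8 * children - 4 then c - 1 else c
  max c 0

-- ===== PRECONDITION & SPEC =====
def Spec_distMoney (money : Int) (children : Int) (out : Int) : Prop := out = distMoney_alt money children
instance (money : Int) (children : Int) (out : Int) : Decidable (Spec_distMoney money children out) := by unfold Spec_distMoney; infer_instance

-- ===== CLAIM (what is proved, stated in full; the proofs are below) =====
def Claim_equal_distMoney : Prop := ∀ (money : Int) (children : Int), Dom_distMoney money children → Spec_distMoney money children (distMoney money children)

-- ===== LEMMAS AND PROOFS =====

-- the effective cap: check money children c = true ↔ c ≤ capEff money children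
def capEff (money : Int) (children : Int) : Int :=
  if money = 8 * children - 4 then PySem.Int.floordiv (money - children) 7 - 1
  else PySem.Int.floordiv (money - children) 7

lemma checkA_iff (money children c : Int) :
    checkA money children c = true ↔ c ≤ capEff money children := by
  unfold checkA capEff
  rw [show PySem.Int.floordiv (money - children) 7 = (money - children) / 7 from
    PySem.Int.floordiv_eq_ediv_of_pos (by omega)]
  simp only [Bool.and_eq_true, beq_iff_eq]
  split_ifs <;> simp_all <;> omega

lemma loopA_eq (money children : Int) : ∀ (n : Nat) (l r ans : Int), (r + 1 - l).toNat = n →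
    loopA money children l r ans =
      if l ≤ r ∧ l ≤ capEff money children then min r (capEff money children) else ans := by
  intro n
  induction n using Nat.strong_induction_on with
  | _ n ih =>
    intro l r ans hn
    unfold loopA
    by_cases hlr : l ≤ r
    · rw [dif_pos hlr]
      have hb := PySem.Int.floordiv_two_mid_bounds hlr
      set m := PySem.Int.floordiv (l + r) 2 with hm
      show (if checkA money children m = true then loopA money children (m + 1) r m
            else loopA money children l (m - 1) ans) = _
      by_cases hc : checkA money children m = true
      · rw [if_pos hc]
        have hcap := (checkA_iff money children m).mp hc
        rw [ih (r + 1 - (m + 1)).toNat (by omega) (m + 1) r m rfl]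
        split_ifs <;> omega
      · rw [if_neg hc]
        have hcap : capEff money children < m := by
          by_contra h
          exact hc ((checkA_iff money children m).mpr (by omega))
        rw [ih (m - 1 + 1 - l).toNat (by omega) l (m - 1) ans rfl]
        split_ifs <;> omega
    · rw [dif_neg hlr, if_neg (by omega)]

-- ===== VERDICT (by name: the statement is the Claim_ definition above) =====
theorem distMoney_spec : Claim_equal_distMoney := by
  intro money children _
  unfold Spec_distMoney distMoney distMoney_alt
  rw [loopA_eq money children (children + 1 - 0).toNat 0 children 0 rfl]
  simp only [Bool.and_eq_true, beq_iff_eq]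
  have hcap : capEff money children =
      (if money = 8 * children - 4 then PySem.Int.floordiv (money - children) 7 - 1
       else PySem.Int.floordiv (money - children) 7) := rfl
  rw [show PySem.Int.floordiv (money - children) 7 = (money - children) / 7 from
    PySem.Int.floordiv_eq_ediv_of_pos (by omega)] at hcap ⊢
  -- when money = 8*children - 4 the floor division gives exactly children - 1
  by_cases hE : money = 8 * children - 4
  · have h7 : (money - children) / 7 = children - 1 := by omega
    simp only [hcap, if_pos hE, h7] at *
    split_ifs <;> omega
  · have hne : ¬ (min children ((money - children) / 7) = children - 1 ∧ money = 8 * children - 4) := by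
      rintro ⟨_, h⟩; exact hE h
    simp only [hcap, if_neg hE] at *
    rw [if_neg hne]
    split_ifs <;> omega
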